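-- pv_equiv track=rewrite | github.com/muinx2022/schedra | backend/campaigns/services.py | build_segment_ranges
-- ===== SOURCE A (Python) =====
-- class CampaignProcessingError(ValueError):
--     pass
--
-- def build_segment_ranges(total_duration_seconds: int, segment_count: int) -> list[tuple[int, int]]:
--     if total_duration_seconds <= 0:
--         raise CampaignProcessingError("Video duration must be greater than zero.")
--     if segment_count <= 0:
--         raise CampaignProcessingError("At least one segment is required.")
--
--     base_duration = total_duration_seconds // segment_count
--     remainder = total_duration_seconds % segment_count
--     ranges: list[tuple[int, int]] = []
--     start = 0
--     for index in range(segment_count):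
--         duration = base_duration
--         if index == segment_count - 1:
--             duration += remainder
--         end = start + duration
--         ranges.append((start, end))
--         start = end
--     return ranges
-- ===== SOURCE B (Python) =====
-- class CampaignProcessingError(ValueError):
--     pass
--
-- def build_segment_ranges(total_duration_seconds: int, segment_count: int) -> list[tuple[int, int]]:
--     if total_duration_seconds <= 0:
--         raise CampaignProcessingError("Video duration must be greater than zero.")
--     if segment_count <= 0:
--         raise CampaignProcessingError("At least one segment is required.")
--
--     base = total_duration_seconds // segment_count
--     return [
--         (index * base,
--          total_duration_seconds if index == segment_count - 1 else (index + 1) * base)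
--         for index in range(segment_count)
--     ]
-- ===== Notes on version B (the rewrite author's own statement) =====
-- stated objective: alternative
-- what changed: Replaces the running 'start' accumulator loop with a direct per-index comprehension: each segment's start is index*base_duration and the last segment's end is total_duration_seconds, so no state is threaded through the loop.
import Mathlib
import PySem

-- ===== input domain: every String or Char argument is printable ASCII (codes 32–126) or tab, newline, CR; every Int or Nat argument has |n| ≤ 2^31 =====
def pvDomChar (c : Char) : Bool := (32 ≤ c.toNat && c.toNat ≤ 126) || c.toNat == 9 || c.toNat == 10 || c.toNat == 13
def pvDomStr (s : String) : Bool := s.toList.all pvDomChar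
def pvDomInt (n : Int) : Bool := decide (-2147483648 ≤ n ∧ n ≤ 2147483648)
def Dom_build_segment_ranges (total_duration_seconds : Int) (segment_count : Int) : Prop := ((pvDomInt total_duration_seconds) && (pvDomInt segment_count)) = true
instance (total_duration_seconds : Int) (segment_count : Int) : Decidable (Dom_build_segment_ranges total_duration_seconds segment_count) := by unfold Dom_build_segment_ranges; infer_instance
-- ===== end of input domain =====

-- B replaces A's running 'start' accumulator with closed-form index arithmetic
-- (start = index*base, last end = total_duration_seconds); same O(n) cost (objective: alternative).

-- ===== PORT A =====
def build_segment_ranges (total_duration_seconds : Int) (segment_count : Int) : List (Int × Int) :=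
  let base_duration := PySem.Int.floordiv total_duration_seconds segment_count
  let remainder := PySem.Int.mod total_duration_seconds segment_count
  ((PySem.List.pyRange 0 segment_count 1).foldl
    (fun (st : List (Int × Int) × Int) index =>
      let duration := if index == segment_count - 1 then base_duration + remainder else base_duration
      let e := st.2 + duration
      (st.1 ++ [(st.2, e)], e))
    ([], 0)).1

-- ===== PORT B =====
def build_segment_ranges_alt (total_duration_seconds : Int) (segment_count : Int) : List (Int × Int) :=
  let base := PySem.Int.floordiv total_duration_seconds segment_count
  (PySem.List.pyRange 0 segment_count 1).map
    (fun index =>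
      (index * base,
       if index == segment_count - 1 then total_duration_seconds else (index + 1) * base))

-- ===== PRECONDITION & SPEC =====
-- A raises CampaignProcessingError when total_duration_seconds ≤ 0 or segment_count ≤ 0;
-- exactly those inputs are excluded.
def Pre_build_segment_ranges (total_duration_seconds : Int) (segment_count : Int) : Prop :=
  0 < total_duration_seconds ∧ 0 < segment_count
instance (total_duration_seconds : Int) (segment_count : Int) : Decidable (Pre_build_segment_ranges total_duration_seconds segment_count) := by unfold Pre_build_segment_ranges; infer_instance

def pvWitness_build_segment_ranges : Int × Int := (10, 3)

def Spec_build_segment_ranges (total_duration_seconds : Int) (segment_count : Int) (out : List (Int × Int)) : Prop := out = build_segment_ranges_alt total_duration_seconds segment_count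
instance (total_duration_seconds : Int) (segment_count : Int) (out : List (Int × Int)) : Decidable (Spec_build_segment_ranges total_duration_seconds segment_count out) := by unfold Spec_build_segment_ranges; infer_instance

-- ===== CLAIM (what is proved, stated in full; the proofs are below) =====
def Claim_equal_build_segment_ranges : Prop := ∀ (total_duration_seconds : Int) (segment_count : Int), Dom_build_segment_ranges total_duration_seconds segment_count → Pre_build_segment_ranges total_duration_seconds segment_count → Spec_build_segment_ranges total_duration_seconds segment_count (build_segment_ranges total_duration_seconds segment_count)

-- ===== LEMMAS AND PROOFS =====

-- Loop invariant: starting the fold at index j with accumulated start j*base,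
-- the fold appends exactly B's segments for indices j..c-1 and ends with start = t.
theorem bsr_aux (t c base r : Int) (hbr : base * c + r = t) :
    ∀ (m : ℕ) (j : Int) (acc : List (Int × Int)), 0 < m → j + (m : Int) = c →
    ((PySem.List.pyRange j c 1).foldl
      (fun (st : List (Int × Int) × Int) index =>
        let duration := if index == c - 1 then base + r else base
        let e := st.2 + duration
        (st.1 ++ [(st.2, e)], e))
      (acc, j * base))
    = (acc ++ (PySem.List.pyRange j c 1).map
        (fun index => (index * base, if index == c - 1 then t else (index + 1) * base)), t) := by
  intro m
  induction m with
  | zero => intro j acc hm; omega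
  | succ m ih =>
    intro j acc _ hj
    by_cases hm0 : m = 0
    · subst hm0
      have hjc : j = c - 1 := by push_cast at hj; omega
      have hlt : j < c := by omega
      rw [PySem.List.pyRange_one_cons hlt, PySem.List.pyRange_one_eq_nil (by omega)]
      simp only [List.foldl_cons, List.foldl_nil, List.map_cons, List.map_nil]
      have hbeq : (j == c - 1) = true := by simp [hjc]
      simp only [hbeq, if_true]
      have hend : j * base + (base + r) = t := by rw [hjc]; linear_combination hbr
      simp [hend]
    · have hmpos : 0 < m := Nat.pos_of_ne_zero hm0
      have hlt : j < c := by push_cast at hj ⊢; omega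
      have hne : j ≠ c - 1 := by push_cast at hj; omega
      have hbeq : (j == c - 1) = false := by simp [hne]
      rw [PySem.List.pyRange_one_cons hlt]
      simp only [List.foldl_cons, List.map_cons, hbeq, Bool.false_eq_true, if_false]
      have hstep : j * base + base = (j + 1) * base := by ring
      rw [hstep]
      have := ih (j + 1) (acc ++ [(j * base, (j + 1) * base)]) hmpos (by push_cast at hj ⊢; omega)
      rw [this]
      simp

theorem build_segment_ranges_spec : Claim_equal_build_segment_ranges := by
  intro t c _ hpre
  obtain ⟨ht, hc⟩ := hpre
  unfold Spec_build_segment_ranges build_segment_ranges build_segment_ranges_alt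
  dsimp only
  have hbr : PySem.Int.floordiv t c * c + PySem.Int.mod t c = t :=
    PySem.Int.floordiv_mul_add_mod t c
  have h := bsr_aux t c (PySem.Int.floordiv t c) (PySem.Int.mod t c) hbr c.toNat 0 []
    (by omega) (by omega)
  simp only [zero_mul] at h
  rw [h]
  simp

-- ===== VERDICT (by name: the statement is the Claim_ definition above) =====
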